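-- pv_equiv track=rewrite | github.com/lunerip/Sorting-Algorithms | RadixSort.py | rSort
-- ===== SOURCE A (Python) =====
-- def rSort(list):
--     q0 = []
--     q1 = []
--     q2 = []
--     q3 = []
--     q4 = []
--     q5 = []
--     q6 = []
--     q7 = []
--     q8 = []
--     q9 = []
--     mod = 10
--     max = 0
--
--     for d in list:
--         if len(str(d)) > max:
--             max = len(str(d))
--
--     for i in range(1, max+1):
--
--         for e in list:
--             if len(str(e)) < i:
--                 q0.append(e)
--             else:
--                 dig = e % mod
--
--                 while len(str(dig))!=1:
--                     dig//=10
--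
--
--                 if dig==1:
--                     q1.append(e)
--
--                 elif dig==2:
--                     q2.append(e)
--
--                 elif dig==3:
--                     q3.append(e)
--
--                 elif dig==4:
--                     q4.append(e)
--
--                 elif dig==5:
--                     q5.append(e)
--
--                 elif dig==6:
--                     q6.append(e)
--
--                 elif dig==7:
--                     q7.append(e)
--
--                 elif dig==8:
--                     q8.append(e)
--
--                 elif dig==9:
--                     q9.append(e)
--
--                 elif dig==0:
--                     q0.append(e)
--             list = q0 + q1 + q2 + q3 + q4 + q5 + q6 + q7 + q8 + q9
--
--         q1 = []
--         q2 = []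
--         q3 = []
--         q4 = []
--         q5 = []
--         q6 = []
--         q7 = []
--         q8 = []
--         q9 = []
--         q0 = []
--
--
--         mod = 10 * mod
--     return list
-- ===== SOURCE B (Python) =====
-- def _key(e, i, mod):
--     if len(str(e)) < i:
--         return 0
--     d = e % mod
--     while d >= 10:
--         d //= 10
--     return d
--
--
-- def rSort(list):
--     width = 0
--     for d in list:
--         width = max(width, len(str(d)))
--     mod = 10
--     for i in range(1, width + 1):
--         list = [e for k in range(10) for e in list if _key(e, i, mod) == k]
--         mod *= 10
--     return list
-- ===== Notes on version B (the rewrite author's own statement) =====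
-- stated objective: faster
-- what changed: Each digit pass collects the ten buckets with one filter comprehension per bucket value and concatenates once, with the bucket key computed by a small arithmetic helper, instead of A's ten named queues with an if/elif chain and a ten-list concatenation re-done after every single element.
import Mathlib
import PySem

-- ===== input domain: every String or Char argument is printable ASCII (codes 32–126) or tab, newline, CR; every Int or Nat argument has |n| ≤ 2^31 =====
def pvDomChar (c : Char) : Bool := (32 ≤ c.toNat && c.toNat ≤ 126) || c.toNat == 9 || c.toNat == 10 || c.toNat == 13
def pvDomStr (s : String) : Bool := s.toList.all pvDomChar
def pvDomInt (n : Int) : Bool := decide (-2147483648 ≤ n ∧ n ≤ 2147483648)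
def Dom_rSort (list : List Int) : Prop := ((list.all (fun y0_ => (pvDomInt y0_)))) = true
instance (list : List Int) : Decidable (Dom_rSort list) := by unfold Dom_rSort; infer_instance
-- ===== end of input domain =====

-- B replaces A's per-element ten-queue re-concatenation by one bucket-filter pass per digit (faster); return values agree on all inputs.

-- ===== PORT A =====
-- the ten queues q0..q9 plus the rebindable variable `list` of A's inner loop
structure RQ where
  q0 : List Int
  q1 : List Int
  q2 : List Int
  q3 : List Int
  q4 : List Int
  q5 : List Int
  q6 : List Int
  q7 : List Int
  q8 : List Int
  q9 : List Int
  lst : List Int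
deriving Repr, DecidableEq

-- q0 + q1 + ... + q9
def rConcat (s : RQ) : List Int :=
  s.q0 ++ s.q1 ++ s.q2 ++ s.q3 ++ s.q4 ++ s.q5 ++ s.q6 ++ s.q7 ++ s.q8 ++ s.q9

-- while len(str(dig)) != 1: dig //= 10   (fuel-bounded for totality only: at every
-- call site dig ≥ 0 and the loop strips a digit per step, so dig.toNat + 1 steps suffice)
def rStrip (fuel : Nat) (dig : Int) : Int :=
  match fuel with
  | 0 => dig
  | f + 1 =>
    if (PySem.Int.toChars dig).length ≠ 1 then rStrip f (PySem.Int.floordiv dig 10) else dig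

-- body of `for e in list:` (appends e to one queue, then `list = q0 + ... + q9`)
def rStepA (i mod : Int) (s : RQ) (e : Int) : RQ :=
  let s' :=
    if ((PySem.Int.toChars e).length : Int) < i then { s with q0 := s.q0 ++ [e] }
    else
      let dig0 := PySem.Int.mod e mod
      let dig := rStrip (dig0.toNat + 1) dig0
      if dig = 1 then { s with q1 := s.q1 ++ [e] }
      else if dig = 2 then { s with q2 := s.q2 ++ [e] }
      else if dig = 3 then { s with q3 := s.q3 ++ [e] }
      else if dig = 4 then { s with q4 := s.q4 ++ [e] }
      else if dig = 5 then { s with q5 := s.q5 ++ [e] }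
      else if dig = 6 then { s with q6 := s.q6 ++ [e] }
      else if dig = 7 then { s with q7 := s.q7 ++ [e] }
      else if dig = 8 then { s with q8 := s.q8 ++ [e] }
      else if dig = 9 then { s with q9 := s.q9 ++ [e] }
      else if dig = 0 then { s with q0 := s.q0 ++ [e] }
      else s
  { s' with lst := rConcat s' }

-- one pass of the outer `for i in range(1, max+1)` loop: fresh queues, then the inner loop
def rPassA (i mod : Int) (l : List Int) : List Int :=
  (l.foldl (rStepA i mod) ⟨[], [], [], [], [], [], [], [], [], [], l⟩).lst

def rSort (list : List Int) : List Int :=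
  let max := list.foldl
    (fun m d => if (PySem.Int.toChars d).length > m then (PySem.Int.toChars d).length else m) 0
  ((PySem.List.pyRange 1 ((max : Int) + 1) 1).foldl
    (fun (st : List Int × Int) i => (rPassA i st.2 st.1, 10 * st.2)) (list, (10 : Int))).1

-- ===== PORT B =====
-- while d >= 10: d //= 10
def rAltMsd (d : Int) : Int :=
  if 10 ≤ d then rAltMsd (PySem.Int.floordiv d 10) else d
termination_by d.toNat
decreasing_by
  rename_i h
  rw [PySem.Int.floordiv_eq_ediv_of_pos (by norm_num)]
  omega

-- _key(e, i, mod)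
def rAltKey (e i mod : Int) : Int :=
  if ((PySem.Int.toChars e).length : Int) < i then 0
  else rAltMsd (PySem.Int.mod e mod)

def rSort_alt (list : List Int) : List Int :=
  let width := list.foldl (fun m d => Nat.max m (PySem.Int.toChars d).length) 0
  ((PySem.List.pyRange 1 ((width : Int) + 1) 1).foldl
    (fun (st : List Int × Int) i =>
      ((PySem.List.pyRange 0 10 1).flatMap
        (fun k => st.1.filter (fun e => rAltKey e i st.2 == k)), st.2 * 10))
    (list, (10 : Int))).1

-- ===== PRECONDITION & SPEC =====
def Spec_rSort (list : List Int) (out : List Int) : Prop := out = rSort_alt list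
instance (list : List Int) (out : List Int) : Decidable (Spec_rSort list out) := by unfold Spec_rSort; infer_instance

-- ===== CLAIM (what is proved, stated in full; the proofs are below) =====
def Claim_equal_rSort : Prop := ∀ (list : List Int), Dom_rSort list → Spec_rSort list (rSort list)

-- ===== LEMMAS AND PROOFS =====

lemma len_toChars_eq_one_iff (d : Int) (h : 0 ≤ d) :
    (PySem.Int.toChars d).length = 1 ↔ d < 10 := by
  have hnd : ¬ d < 0 := by omega
  simp only [PySem.Int.toChars, if_neg hnd]
  have h1 : (Nat.toDigits 10 d.toNat).length ≤ 1 ↔ d.toNat < 10 ^ 1 :=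
    Nat.length_toDigits_le_iff (by norm_num) (by norm_num)
  have h2 : 0 < (Nat.toDigits 10 d.toNat).length := Nat.length_toDigits_pos
  constructor
  · intro he; have := h1.mp (by omega); omega
  · intro hd; have := h1.mpr (by simpa using (by omega : d.toNat < 10)); omega

lemma msd_bounds (d : Int) (h : 0 ≤ d) : 0 ≤ rAltMsd d ∧ rAltMsd d < 10 := by
  induction d using rAltMsd.induct with
  | case1 d h10 ih =>
    rw [rAltMsd, if_pos h10]
    exact ih (by rw [PySem.Int.floordiv_eq_ediv_of_pos (by norm_num)]; omega)
  | case2 d h10 =>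
    rw [rAltMsd, if_neg h10]
    omega

lemma strip_eq_msd (fuel : Nat) (d : Int) (h : 0 ≤ d) (hf : d.toNat < fuel) :
    rStrip fuel d = rAltMsd d := by
  induction fuel generalizing d with
  | zero => omega
  | succ f ih =>
    rw [rStrip, rAltMsd]
    by_cases hd : d < 10
    · rw [if_neg (by simp [(len_toChars_eq_one_iff d h).mpr hd]), if_neg (by omega)]
    · have hdiv : PySem.Int.floordiv d 10 = d / 10 :=
        PySem.Int.floordiv_eq_ediv_of_pos (by norm_num)
      rw [if_pos (by simp [len_toChars_eq_one_iff d h]; omega), if_pos (by omega)]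
      exact ih _ (by omega) (by rw [hdiv]; omega)

-- e goes to queue number k = rAltKey e i mod (and nowhere else)
def rIns (k e : Int) (s : RQ) : RQ :=
  { q0 := s.q0 ++ if k = 0 then [e] else []
    q1 := s.q1 ++ if k = 1 then [e] else []
    q2 := s.q2 ++ if k = 2 then [e] else []
    q3 := s.q3 ++ if k = 3 then [e] else []
    q4 := s.q4 ++ if k = 4 then [e] else []
    q5 := s.q5 ++ if k = 5 then [e] else []
    q6 := s.q6 ++ if k = 6 then [e] else []
    q7 := s.q7 ++ if k = 7 then [e] else []
    q8 := s.q8 ++ if k = 8 then [e] else []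
    q9 := s.q9 ++ if k = 9 then [e] else []
    lst := s.lst }

lemma stepA_char (i mod : Int) (hm : 0 < mod) (s : RQ) (e : Int) :
    rStepA i mod s e = { rIns (rAltKey e i mod) e s with lst := rConcat (rIns (rAltKey e i mod) e s) } := by
  have h0 : 0 ≤ PySem.Int.mod e mod := PySem.Int.mod_nonneg e hm
  simp only [rStepA, rAltKey, rIns]
  by_cases hlen : ((PySem.Int.toChars e).length : Int) < i
  · simp [hlen]
  · rw [strip_eq_msd _ _ h0 (by omega)]
    have hb := msd_bounds (PySem.Int.mod e mod) h0
    simp only [if_neg hlen]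
    have : rAltMsd (PySem.Int.mod e mod) = 0 ∨ rAltMsd (PySem.Int.mod e mod) = 1 ∨
        rAltMsd (PySem.Int.mod e mod) = 2 ∨ rAltMsd (PySem.Int.mod e mod) = 3 ∨
        rAltMsd (PySem.Int.mod e mod) = 4 ∨ rAltMsd (PySem.Int.mod e mod) = 5 ∨
        rAltMsd (PySem.Int.mod e mod) = 6 ∨ rAltMsd (PySem.Int.mod e mod) = 7 ∨
        rAltMsd (PySem.Int.mod e mod) = 8 ∨ rAltMsd (PySem.Int.mod e mod) = 9 := by omega
    rcases this with h | h | h | h | h | h | h | h | h | h <;> simp [h]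

-- one filter per queue value
def rFil (i mod k : Int) (l : List Int) : List Int :=
  l.filter (fun e => rAltKey e i mod == k)

lemma foldA_char (i mod : Int) (hm : 0 < mod) (l : List Int) (s : RQ) :
    (l.foldl (rStepA i mod) s).q0 = s.q0 ++ rFil i mod 0 l ∧
    (l.foldl (rStepA i mod) s).q1 = s.q1 ++ rFil i mod 1 l ∧
    (l.foldl (rStepA i mod) s).q2 = s.q2 ++ rFil i mod 2 l ∧
    (l.foldl (rStepA i mod) s).q3 = s.q3 ++ rFil i mod 3 l ∧
    (l.foldl (rStepA i mod) s).q4 = s.q4 ++ rFil i mod 4 l ∧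
    (l.foldl (rStepA i mod) s).q5 = s.q5 ++ rFil i mod 5 l ∧
    (l.foldl (rStepA i mod) s).q6 = s.q6 ++ rFil i mod 6 l ∧
    (l.foldl (rStepA i mod) s).q7 = s.q7 ++ rFil i mod 7 l ∧
    (l.foldl (rStepA i mod) s).q8 = s.q8 ++ rFil i mod 8 l ∧
    (l.foldl (rStepA i mod) s).q9 = s.q9 ++ rFil i mod 9 l ∧
    (l.foldl (rStepA i mod) s).lst =
      (if l = [] then s.lst else rConcat (l.foldl (rStepA i mod) s)) := by
  induction l generalizing s with
  | nil => simp [rFil]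
  | cons e t ih =>
    have hstep := stepA_char i mod hm s e
    have iht := ih (rStepA i mod s e)
    obtain ⟨i0, i1, i2, i3, i4, i5, i6, i7, i8, i9, il⟩ := iht
    have hfil : ∀ k : Int, rFil i mod k (e :: t) =
        (if rAltKey e i mod = k then [e] else []) ++ rFil i mod k t := by
      intro k
      simp only [rFil, List.filter_cons]
      split_ifs with h1 h2 h2 <;> simp_all
    refine ⟨?_, ?_, ?_, ?_, ?_, ?_, ?_, ?_, ?_, ?_, ?_⟩
    · rw [List.foldl_cons, i0, hstep, hfil]; simp [rIns]
    · rw [List.foldl_cons, i1, hstep, hfil]; simp [rIns]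
    · rw [List.foldl_cons, i2, hstep, hfil]; simp [rIns]
    · rw [List.foldl_cons, i3, hstep, hfil]; simp [rIns]
    · rw [List.foldl_cons, i4, hstep, hfil]; simp [rIns]
    · rw [List.foldl_cons, i5, hstep, hfil]; simp [rIns]
    · rw [List.foldl_cons, i6, hstep, hfil]; simp [rIns]
    · rw [List.foldl_cons, i7, hstep, hfil]; simp [rIns]
    · rw [List.foldl_cons, i8, hstep, hfil]; simp [rIns]
    · rw [List.foldl_cons, i9, hstep, hfil]; simp [rIns]
    · rw [List.foldl_cons, il]
      by_cases ht : t = []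
      · subst ht
        simp only [List.foldl_nil, if_neg (List.cons_ne_nil e [])]
        rw [hstep]
        simp [rConcat]
      · rw [if_neg ht, if_neg (List.cons_ne_nil e t)]

lemma passA_eq (i mod : Int) (hm : 0 < mod) (l : List Int) :
    rPassA i mod l =
      (PySem.List.pyRange 0 10 1).flatMap (fun k => l.filter (fun e => rAltKey e i mod == k)) := by
  have hR : PySem.List.pyRange 0 10 1 = [0, 1, 2, 3, 4, 5, 6, 7, 8, 9] := by decide
  obtain ⟨i0, i1, i2, i3, i4, i5, i6, i7, i8, i9, il⟩ :=
    foldA_char i mod hm l ⟨[], [], [], [], [], [], [], [], [], [], l⟩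
  rw [rPassA, il]
  by_cases hl : l = []
  · subst hl; simp [hR]
  · rw [if_neg hl, hR, rConcat, i0, i1, i2, i3, i4, i5, i6, i7, i8, i9]
    simp [rFil, List.flatMap]

lemma outer_eq (r : List Int) (l : List Int) (m : Int) (hm : 0 < m) :
    (r.foldl (fun (st : List Int × Int) i => (rPassA i st.2 st.1, 10 * st.2)) (l, m)).1 =
    (r.foldl (fun (st : List Int × Int) i =>
      ((PySem.List.pyRange 0 10 1).flatMap
        (fun k => st.1.filter (fun e => rAltKey e i st.2 == k)), st.2 * 10)) (l, m)).1 := by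
  induction r generalizing l m with
  | nil => rfl
  | cons i t ih =>
    simp only [List.foldl_cons]
    rw [passA_eq i m hm l, (by ring : 10 * m = m * 10)]
    exact ih _ _ (by omega)

lemma width_eq (l : List Int) : ∀ (m : Nat),
    l.foldl
      (fun m d => if (PySem.Int.toChars d).length > m then (PySem.Int.toChars d).length else m) m =
    l.foldl (fun m d => Nat.max m (PySem.Int.toChars d).length) m := by
  induction l with
  | nil => intro m; rfl
  | cons d t ih =>
    intro m
    simp only [List.foldl_cons]
    rw [(by simp only [Nat.max_def]; split_ifs <;> omega :
      (if (PySem.Int.toChars d).length > m then (PySem.Int.toChars d).length else m) =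
        Nat.max m (PySem.Int.toChars d).length)]
    exact ih _

-- ===== VERDICT (by name: the statement is the Claim_ definition above) =====
theorem rSort_spec : Claim_equal_rSort := by
  intro list _
  unfold Spec_rSort rSort rSort_alt
  rw [width_eq]
  exact outer_eq _ list 10 (by norm_num)
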